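-- pv_equiv track=rewrite | github.com/arnokamphuis/everybody_codes | story_1/day01_part3.py | eni_sum_remainders
-- ===== SOURCE A (Python) =====
-- def eni_sum_remainders(N, EXP, MOD):
--     """
--     Efficiently computes the sum of all remainders produced during modular exponentiation:
--     - N: base number
--     - EXP: exponent (number of multiplications)
--     - MOD: modulus
--     Returns: integer sum of all remainders encountered in the sequence.
--     """
--     if EXP == 0:
--         return 0
--     score = 1
--     total = 0
--     seen = dict()  # (score) -> (step, total)
--     steps = 0
--     while steps < EXP:
--         score = (score * N) % MOD
--         total += score
--         key = score
--         if key in seen: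
--             # Cycle detected
--             prev_step, prev_total = seen[key]
--             cycle_len = steps - prev_step
--             cycle_sum = total - prev_total
--             remaining_steps = EXP - steps - 1
--             if cycle_len > 0:
--                 skip_cycles = remaining_steps // cycle_len
--                 total += skip_cycles * cycle_sum
--                 steps += skip_cycles * cycle_len
--         else:
--             seen[key] = (steps, total)
--         steps += 1
--     return total
-- ===== SOURCE B (Python) =====
-- def eni_sum_remainders(N, EXP, MOD):
--     """Floyd tortoise/hare cycle finding (no dict, no stored remainder history):
--     find a meeting point with two pointers, derive the cycle start and length,
--     then assemble the total as prefix sum + full-cycle multiples + partial cycle."""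
--     if EXP <= 0:
--         return 0
--
--     def f(x):
--         return (x * N) % MOD
--
--     def walk(x, steps):
--         # advance `steps` times, returning the final value and the sum visited
--         total = 0
--         for _ in range(steps):
--             x = f(x)
--             total += x
--         return x, total
--
--     # Phase 1: tortoise/hare meeting, capped at EXP advances of the tortoise.
--     tort = f(1)
--     hare = f(f(1))
--     k = 1
--     while k <= EXP and tort != hare:
--         tort = f(tort)
--         hare = f(f(hare))
--         k += 1
--     if tort != hare:
--         # no meeting within the first EXP terms: sum them directly
--         return walk(1, EXP)[1]
--     # Phase 2: first index whose value recurs with the meeting stride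
--     mu = 0
--     tort = 1
--     while tort != hare:
--         tort = f(tort)
--         hare = f(hare)
--         mu += 1
--     # Phase 3: cycle length
--     lam = 1
--     hare = f(tort)
--     while tort != hare:
--         hare = f(hare)
--         lam += 1
--     a = mu if mu >= 1 else 1          # cycle start among the summed indices
--     pre_len = a - 1
--     if EXP <= pre_len + lam:
--         return walk(1, EXP)[1]
--     x, pre_sum = walk(1, pre_len)
--     q, r = divmod(EXP - pre_len, lam)
--     cyc_sum = walk(x, lam)[1]
--     part_sum = walk(x, r)[1]
--     return pre_sum + q * cyc_sum + part_sum
-- ===== Notes on version B (the rewrite author's own statement) =====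
-- stated objective: alternative
-- what changed: A detects the first repeated residue with a hash map (value -> step,total) and jumps ahead inside its single while-loop; B uses Floyd's tortoise-and-hare two-pointer cycle finding with no dict and no stored history, then assembles the answer arithmetically as prefix sum + full-cycle multiples + partial-cycle sum via a small walk helper.
import Mathlib
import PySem

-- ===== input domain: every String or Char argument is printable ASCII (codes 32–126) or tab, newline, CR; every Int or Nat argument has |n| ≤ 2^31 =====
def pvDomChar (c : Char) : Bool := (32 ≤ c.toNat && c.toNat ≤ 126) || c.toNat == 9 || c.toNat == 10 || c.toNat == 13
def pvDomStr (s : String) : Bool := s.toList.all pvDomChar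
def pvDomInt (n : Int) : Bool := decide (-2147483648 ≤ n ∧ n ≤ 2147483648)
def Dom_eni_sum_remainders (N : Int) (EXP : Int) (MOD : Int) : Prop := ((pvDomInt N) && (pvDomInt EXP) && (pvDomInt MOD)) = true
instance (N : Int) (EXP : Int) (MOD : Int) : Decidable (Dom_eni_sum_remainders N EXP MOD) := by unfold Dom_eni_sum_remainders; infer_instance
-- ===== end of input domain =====

-- B replaces A's dict-based cycle skipping by Floyd's tortoise-and-hare two-pointer
-- cycle finding (no dict, no stored history) and assembles the total arithmetically
-- from prefix / full-cycle / partial-cycle sums; alternative structure, same cost.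

-- ===== PORT A =====
-- A's while loop: state (score, total, seen, steps); fuel is only a totality guard
-- (steps strictly increases each iteration, so EXP.toNat + 1 units never run out)
def eniLoopA (N MOD EXP : Int) : Nat → Int → Int → PySem.Dict Int (Int × Int) → Int → Int
  | 0, _, total, _, _ => total
  | fuel + 1, score, total, seen, steps =>
    if steps < EXP then
      let score' := PySem.Int.mod (score * N) MOD
      let total' := total + score'
      match seen.get? score' with
      | some (prevStep, prevTotal) =>
          let cycleLen := steps - prevStep
          let cycleSum := total' - prevTotal
          let remaining := EXP - steps - 1
          if cycleLen > 0 then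
            let skip := PySem.Int.floordiv remaining cycleLen
            eniLoopA N MOD EXP fuel score' (total' + skip * cycleSum) seen
              (steps + skip * cycleLen + 1)
          else
            eniLoopA N MOD EXP fuel score' total' seen (steps + 1)
      | none =>
          eniLoopA N MOD EXP fuel score' total'
            (seen.insert score' (steps, total')) (steps + 1)
    else total

def eni_sum_remainders (N : Int) (EXP : Int) (MOD : Int) : Int :=
  if EXP = 0 then 0
  else eniLoopA N MOD EXP (EXP.toNat + 1) 1 0 PySem.Dict.empty 0

-- ===== PORT B =====
-- B's step function f(x) = (x * N) % MOD
def fB (N MOD x : Int) : Int := PySem.Int.mod (x * N) MOD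

-- B's walk helper: advance `steps` times, return the final value and the sum visited
def walkB (N MOD : Int) : Nat → Int → Int → Int × Int
  | 0, x, total => (x, total)
  | n + 1, x, total => walkB N MOD n (fB N MOD x) (total + fB N MOD x)

-- B's phase 1: tortoise/hare meeting, capped at EXP advances of the tortoise
def floydMeet (N MOD EXP : Int) : Nat → Int → Int → Int → Int × Int × Int
  | 0, tort, hare, k => (tort, hare, k)
  | fuel + 1, tort, hare, k =>
    if k ≤ EXP ∧ tort ≠ hare then
      floydMeet N MOD EXP fuel (fB N MOD tort) (fB N MOD (fB N MOD hare)) (k + 1)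
    else (tort, hare, k)

-- B's phase 2: first index whose value recurs with the meeting stride
def findMu (N MOD : Int) : Nat → Int → Int → Int → Int × Int × Int
  | 0, tort, hare, mu => (tort, hare, mu)
  | fuel + 1, tort, hare, mu =>
    if tort ≠ hare then findMu N MOD fuel (fB N MOD tort) (fB N MOD hare) (mu + 1)
    else (tort, hare, mu)

-- B's phase 3: cycle length
def findLam (N MOD : Int) : Nat → Int → Int → Int → Int
  | 0, _, _, lam => lam
  | fuel + 1, tort, hare, lam =>
    if tort ≠ hare then findLam N MOD fuel tort (fB N MOD hare) (lam + 1)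
    else lam

def eni_sum_remainders_alt (N : Int) (EXP : Int) (MOD : Int) : Int :=
  if EXP ≤ 0 then 0
  else
    let r1 := floydMeet N MOD EXP (EXP.toNat + 1) (fB N MOD 1) (fB N MOD (fB N MOD 1)) 1
    if r1.1 ≠ r1.2.1 then (walkB N MOD EXP.toNat 1 0).2
    else
      let r2 := findMu N MOD (EXP.toNat + 2) 1 r1.2.1 0
      let lam := findLam N MOD (EXP.toNat + 2) r2.1 (fB N MOD r2.1) 1
      let a := if r2.2.2 ≥ 1 then r2.2.2 else 1
      let preLen := a - 1
      if EXP ≤ preLen + lam then (walkB N MOD EXP.toNat 1 0).2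
      else
        let w := walkB N MOD preLen.toNat 1 0
        let q := PySem.Int.floordiv (EXP - preLen) lam
        let r := PySem.Int.mod (EXP - preLen) lam
        w.2 + q * (walkB N MOD lam.toNat w.1 0).2 + (walkB N MOD r.toNat w.1 0).2

-- ===== PRECONDITION & SPEC =====
-- Pre_ excludes exactly the inputs where Python A raises ZeroDivisionError (MOD = 0 with
-- EXP > 0, where '% MOD' is first executed); B raises the same exception there.
def Pre_eni_sum_remainders (N : Int) (EXP : Int) (MOD : Int) : Prop := EXP ≤ 0 ∨ MOD ≠ 0
instance (N : Int) (EXP : Int) (MOD : Int) : Decidable (Pre_eni_sum_remainders N EXP MOD) := by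
  unfold Pre_eni_sum_remainders; infer_instance

def pvWitness_eni_sum_remainders : Int × Int × Int := (3, 10, 7)

def Spec_eni_sum_remainders (N : Int) (EXP : Int) (MOD : Int) (out : Int) : Prop := out = eni_sum_remainders_alt N EXP MOD
instance (N : Int) (EXP : Int) (MOD : Int) (out : Int) : Decidable (Spec_eni_sum_remainders N EXP MOD out) := by unfold Spec_eni_sum_remainders; infer_instance

-- ===== CLAIM (what is proved, stated in full; the proofs are below) =====
def Claim_equal_eni_sum_remainders : Prop := ∀ (N : Int) (EXP : Int) (MOD : Int), Dom_eni_sum_remainders N EXP MOD → Pre_eni_sum_remainders N EXP MOD → Spec_eni_sum_remainders N EXP MOD (eni_sum_remainders N EXP MOD)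

-- ===== LEMMAS AND PROOFS =====

-- the remainder sequence: pr 0 = 1, pr (k+1) = (pr k * N) % MOD
def pr (N MOD : Int) : Nat → Int
  | 0 => 1
  | k + 1 => PySem.Int.mod (pr N MOD k * N) MOD

-- S a m = pr a + pr (a+1) + … + pr (a+m-1)
def S (N MOD : Int) (a m : Nat) : Int := ((List.range m).map (fun t => pr N MOD (a + t))).sum

lemma S_succ (N MOD : Int) (a m : Nat) : S N MOD a (m + 1) = S N MOD a m + pr N MOD (a + m) := by
  simp [S, List.range_succ]

lemma S_add (N MOD : Int) (a m1 m2 : Nat) :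
    S N MOD a (m1 + m2) = S N MOD a m1 + S N MOD (a + m1) m2 := by
  induction m2 with
  | zero => simp [S]
  | succ k ih =>
      rw [show m1 + (k + 1) = (m1 + k) + 1 from rfl, S_succ, ih, S_succ,
        show a + m1 + k = a + (m1 + k) by omega]
      ring

lemma pr_det (N MOD : Int) (x y : Nat) (h : pr N MOD x = pr N MOD y) :
    ∀ t, pr N MOD (x + t) = pr N MOD (y + t) := by
  intro t
  induction t with
  | zero => simpa using h
  | succ k ih => rw [show x + (k+1) = (x+k) + 1 from rfl, show y + (k+1) = (y+k) + 1 from rfl,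
      pr, pr, ih]

-- from an anchor pr (a+P) = pr a, the sequence has period P from index a on
lemma pr_shift (N MOD : Int) (a P : Nat) (hper : pr N MOD (a + P) = pr N MOD a)
    (b : Nat) (hb : a ≤ b) : pr N MOD (b + P) = pr N MOD b := by
  have h := pr_det N MOD (a + P) a hper (b - a)
  rw [show a + P + (b - a) = b + P by omega, show a + (b - a) = b by omega] at h
  exact h

lemma pr_shift_iter (N MOD : Int) (a P : Nat) (hper : pr N MOD (a + P) = pr N MOD a)
    (b : Nat) (hb : a ≤ b) (q : Nat) : pr N MOD (b + q * P) = pr N MOD b := by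
  induction q with
  | zero => simp
  | succ k ih =>
      rw [show b + (k+1) * P = (b + k * P) + P by ring, pr_shift N MOD a P hper _ (by omega), ih]

lemma S_shift (N MOD : Int) (a P : Nat) (hper : pr N MOD (a + P) = pr N MOD a)
    (b : Nat) (hb : a ≤ b) (m : Nat) : S N MOD (b + P) m = S N MOD b m := by
  induction m with
  | zero => simp [S]
  | succ k ih =>
      rw [S_succ, S_succ, ih, show b + P + k = (b + k) + P by omega,
        pr_shift N MOD a P hper (b + k) (by omega)]

lemma S_shift_iter (N MOD : Int) (a P : Nat) (hper : pr N MOD (a + P) = pr N MOD a)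
    (b : Nat) (hb : a ≤ b) (q m : Nat) : S N MOD (b + q * P) m = S N MOD b m := by
  induction q with
  | zero => simp
  | succ k ih =>
      rw [show b + (k+1) * P = (b + k * P) + P by ring,
        S_shift N MOD a P hper _ (by omega), ih]

lemma S_cycles (N MOD : Int) (a P : Nat) (hper : pr N MOD (a + P) = pr N MOD a)
    (b : Nat) (hb : a ≤ b) (q : Nat) : S N MOD b (q * P) = (q : Int) * S N MOD b P := by
  induction q with
  | zero => simp [S]
  | succ k ih =>
      rw [show (k+1) * P = P + k * P by ring, S_add, S_shift N MOD a P hper b hb, ih]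
      push_cast; ring

-- the invariant of A's seen dict
def SeenInv (N MOD : Int) (seen : PySem.Dict Int (Int × Int)) (n : Nat) : Prop :=
  ∀ v s t, seen.get? v = some (s, t) →
    ∃ p : Nat, s = (p : Int) ∧ t = S N MOD 1 (p + 1) ∧ pr N MOD (p + 1) = v ∧ p < n

-- unfolding lemmas for A's loop
lemma eniLoopA_stop (N MOD EXP : Int) (fuel : Nat) (score total : Int)
    (seen : PySem.Dict Int (Int × Int)) (steps : Int) (h : ¬ steps < EXP) :
    eniLoopA N MOD EXP (fuel + 1) score total seen steps = total := by
  rw [eniLoopA, if_neg h]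

lemma eniLoopA_none (N MOD EXP : Int) (fuel : Nat) (score total : Int)
    (seen : PySem.Dict Int (Int × Int)) (steps : Int) (h : steps < EXP)
    (hg : seen.get? (PySem.Int.mod (score * N) MOD) = none) :
    eniLoopA N MOD EXP (fuel + 1) score total seen steps =
      eniLoopA N MOD EXP fuel (PySem.Int.mod (score * N) MOD)
        (total + PySem.Int.mod (score * N) MOD)
        (seen.insert (PySem.Int.mod (score * N) MOD)
          (steps, total + PySem.Int.mod (score * N) MOD)) (steps + 1) := by
  rw [eniLoopA, if_pos h]
  simp only [hg]

lemma eniLoopA_cyc (N MOD EXP : Int) (fuel : Nat) (score total : Int)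
    (seen : PySem.Dict Int (Int × Int)) (steps ps pt : Int) (h : steps < EXP)
    (hg : seen.get? (PySem.Int.mod (score * N) MOD) = some (ps, pt))
    (hc : steps - ps > 0) :
    eniLoopA N MOD EXP (fuel + 1) score total seen steps =
      eniLoopA N MOD EXP fuel (PySem.Int.mod (score * N) MOD)
        (total + PySem.Int.mod (score * N) MOD +
          PySem.Int.floordiv (EXP - steps - 1) (steps - ps) *
            (total + PySem.Int.mod (score * N) MOD - pt))
        seen
        (steps + PySem.Int.floordiv (EXP - steps - 1) (steps - ps) * (steps - ps) + 1) := by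
  rw [eniLoopA, if_pos h]
  simp only [hg, if_pos hc]

lemma S_succ' (N MOD : Int) (n : Nat) :
    S N MOD 1 (n + 1) = S N MOD 1 n + pr N MOD (n + 1) := by
  rw [S_succ, Nat.add_comm 1 n]

lemma SeenInv_mono (N MOD : Int) (seen : PySem.Dict Int (Int × Int)) {n n' : Nat}
    (h : SeenInv N MOD seen n) (hle : n ≤ n') : SeenInv N MOD seen n' := by
  intro v s t hvt
  obtain ⟨p, h1, h2, h3, h4⟩ := h v s t hvt
  exact ⟨p, h1, h2, h3, by omega⟩

lemma loopA_correct (N MOD EXP : Int) :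
    ∀ (fuel : Nat) (n : Nat) (seen : PySem.Dict Int (Int × Int)),
    (EXP - (n : Int)).toNat < fuel → (n : Int) ≤ EXP → SeenInv N MOD seen n →
    eniLoopA N MOD EXP fuel (pr N MOD n) (S N MOD 1 n) seen (n : Int) = S N MOD 1 EXP.toNat := by
  intro fuel
  induction fuel with
  | zero => intro n seen hf; omega
  | succ fuel IH =>
    intro n seen hf hn hseen
    by_cases h : (n : Int) < EXP
    · have hsc : PySem.Int.mod (pr N MOD n * N) MOD = pr N MOD (n + 1) := rfl
      rcases hg : seen.get? (pr N MOD (n + 1)) with - | ⟨s, t⟩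
      · -- value not seen yet: store it and step
        rw [eniLoopA_none N MOD EXP fuel _ _ seen _ h (by rw [hsc]; exact hg), hsc, ← S_succ',
          show (n : Int) + 1 = ((n + 1 : Nat) : Int) by push_cast; ring]
        apply IH (n + 1) _ (by omega) (by omega)
        intro v s t hvt
        rw [PySem.Dict.get?_insert] at hvt
        split_ifs at hvt with hv
        · refine ⟨n, ?_, ?_, ?_, by omega⟩ <;> simp_all [S_succ']
        · obtain ⟨p, h1, h2, h3, h4⟩ := hseen v s t hvt
          exact ⟨p, h1, h2, h3, by omega⟩
      · -- cycle detected
        obtain ⟨p, hs, ht, hpr, hpn⟩ := hseen _ _ _ hg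
        subst hs ht
        have hc : (n : Int) - (p : Int) > 0 := by omega
        rw [eniLoopA_cyc N MOD EXP fuel _ _ seen _ _ _ h (by rw [hsc]; exact hg) hc, hsc]
        set P : Nat := n - p with hP
        have hPc : ((P : Nat) : Int) = (n : Int) - (p : Int) := by omega
        have hper : pr N MOD ((p + 1) + P) = pr N MOD (p + 1) := by
          rw [show (p + 1) + P = n + 1 by omega]; exact hpr.symm
        set skip := PySem.Int.floordiv (EXP - (n : Int) - 1) ((n : Int) - (p : Int)) with hsk
        have hskip0 : 0 ≤ skip := by
          rw [hsk, PySem.Int.floordiv_eq_ediv_of_pos hc]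
          exact Int.ediv_nonneg (by omega) (by omega)
        set q : Nat := skip.toNat with hq
        have hqc : (q : Int) = skip := Int.toNat_of_nonneg hskip0
        have hle : skip * ((n : Int) - (p : Int)) ≤ EXP - (n : Int) - 1 := by
          have h1 := PySem.Int.floordiv_mul_add_mod (EXP - (n : Int) - 1) ((n : Int) - (p : Int))
          have h2 := PySem.Int.mod_nonneg (EXP - (n : Int) - 1) hc
          rw [← hsk] at h1
          omega
        set n' : Nat := n + 1 + q * P with hn'
        have hsteps : (n : Int) + skip * ((n : Int) - (p : Int)) + 1 = ((n' : Nat) : Int) := by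
          rw [hn', ← hqc, ← hPc]; push_cast; ring
        have hscore : pr N MOD (n + 1) = pr N MOD n' := by
          rw [hn', show n + 1 + q * P = (n + 1) + q * P by ring,
            pr_shift_iter N MOD (p + 1) P hper (n + 1) (by omega) q]
        have hcs : S N MOD 1 (n + 1) - S N MOD 1 (p + 1) = S N MOD (p + 2) P := by
          have := S_add N MOD 1 (p + 1) P
          rw [show (p + 1) + P = n + 1 by omega, show 1 + (p + 1) = p + 2 by omega] at this
          omega
        have htot : S N MOD 1 (n + 1) + skip * (S N MOD 1 (n + 1) - S N MOD 1 (p + 1))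
            = S N MOD 1 n' := by
          rw [hcs, ← hqc, hn', show n + 1 + q * P = (n + 1) + q * P by ring,
            S_add N MOD 1 (n + 1) (q * P), show 1 + (n + 1) = (p + 2) + P by omega,
            S_shift N MOD (p + 1) P hper (p + 2) (by omega),
            S_cycles N MOD (p + 1) P hper (p + 2) (by omega) q]
        have hn'le : ((n' : Nat) : Int) ≤ EXP := by
          rw [hn']; push_cast
          rw [hqc]
          have : skip * ((P : Nat) : Int) = skip * ((n : Int) - (p : Int)) := by rw [hPc]
          omega
        rw [← S_succ', htot, hsteps, hscore]
        refine IH n' seen ?_ hn'le (SeenInv_mono N MOD seen hseen (by omega))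
        have : (n : Nat) < n' := by omega
        omega
    · rw [eniLoopA_stop N MOD EXP fuel _ _ seen _ h,
        show EXP.toNat = n by omega]

lemma eniA_eq (N MOD EXP : Int) (h : 0 < EXP) :
    eni_sum_remainders N EXP MOD = S N MOD 1 EXP.toNat := by
  unfold eni_sum_remainders
  rw [if_neg (by omega)]
  have h0 := loopA_correct N MOD EXP (EXP.toNat + 1) 0 PySem.Dict.empty (by omega) (by omega)
    (by intro v s t hvt; rw [PySem.Dict.get?_empty] at hvt; cases hvt)
  simpa [pr, S] using h0

-- ===== B-side lemmas =====

lemma fB_pr (N MOD : Int) (t : Nat) : fB N MOD (pr N MOD t) = pr N MOD (t + 1) := rfl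

lemma walkB_spec (N MOD : Int) :
    ∀ (n t : Nat) (acc : Int),
    walkB N MOD n (pr N MOD t) acc = (pr N MOD (t + n), acc + S N MOD (t + 1) n) := by
  intro n
  induction n with
  | zero => intro t acc; simp [walkB, S]
  | succ k ih =>
      intro t acc
      rw [walkB, fB_pr, ih (t + 1), show t + 1 + k = t + (k + 1) by omega]
      have : S N MOD (t + 1) (k + 1) = pr N MOD (t + 1) + S N MOD (t + 2) k := by
        have := S_add N MOD (t + 1) 1 k
        rw [show 1 + k = k + 1 by omega, show t + 1 + 1 = t + 2 by omega] at this
        simp only [S, List.range_one, List.map_cons, List.map_nil, List.sum_cons,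
          List.sum_nil, Nat.add_zero] at this ⊢
        omega
      rw [this]; ring_nf

lemma floyd_spec (N MOD EXP : Int) (hE : 0 < EXP) :
    ∀ (fuel : Nat) (k : Nat), 1 ≤ k → k ≤ EXP.toNat + 1 → EXP.toNat + 2 ≤ fuel + k →
    ∃ kf : Nat, k ≤ kf ∧ kf ≤ EXP.toNat + 1 ∧
      floydMeet N MOD EXP fuel (pr N MOD k) (pr N MOD (2 * k)) (k : Int)
        = (pr N MOD kf, pr N MOD (2 * kf), (kf : Int)) ∧
      (¬ ((kf : Int) ≤ EXP) ∨ pr N MOD kf = pr N MOD (2 * kf)) := by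
  intro fuel
  induction fuel with
  | zero => intro k h1 h2 h3; omega
  | succ fuel ih =>
    intro k h1 h2 h3
    by_cases hc : (k : Int) ≤ EXP ∧ pr N MOD k ≠ pr N MOD (2 * k)
    · have hk : k ≤ EXP.toNat := by omega
      obtain ⟨kf, hk1, hk2, hk3, hk4⟩ := ih (k + 1) (by omega) (by omega) (by omega)
      refine ⟨kf, by omega, hk2, ?_, hk4⟩
      rw [floydMeet, if_pos hc, fB_pr, fB_pr, fB_pr,
        show 2 * k + 1 + 1 = 2 * (k + 1) by omega,
        show ((k : Nat) : Int) + 1 = (((k + 1 : Nat)) : Int) by push_cast; ring]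
      exact hk3
    · refine ⟨k, le_refl k, h2, ?_, ?_⟩
      · rw [floydMeet, if_neg hc]
      · by_cases hm : pr N MOD k = pr N MOD (2 * k)
        · exact Or.inr hm
        · exact Or.inl (by tauto)

lemma findMu_spec (N MOD : Int) (K B2 : Nat) :
    ∀ (fuel : Nat) (m : Nat),
    (∃ j, m ≤ j ∧ j ≤ B2 ∧ pr N MOD j = pr N MOD (K + j)) → B2 + 1 ≤ fuel + m →
    ∃ m', m ≤ m' ∧ m' ≤ B2 ∧ pr N MOD m' = pr N MOD (K + m') ∧
      findMu N MOD fuel (pr N MOD m) (pr N MOD (K + m)) (m : Int)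
        = (pr N MOD m', pr N MOD (K + m'), (m' : Int)) := by
  intro fuel
  induction fuel with
  | zero =>
      intro m hj hf
      obtain ⟨j, hj1, hj2, _⟩ := hj
      omega
  | succ fuel ih =>
    intro m hj hf
    by_cases hc : pr N MOD m ≠ pr N MOD (K + m)
    · obtain ⟨j, hj1, hj2, hj3⟩ := hj
      have hmj : m + 1 ≤ j := by
        rcases Nat.lt_or_ge m j with h | h
        · omega
        · exfalso; have : m = j := by omega
          subst this; exact hc hj3
      obtain ⟨m', h1, h2, h3, h4⟩ := ih (m + 1) ⟨j, hmj, hj2, hj3⟩ (by omega)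
      refine ⟨m', by omega, h2, h3, ?_⟩
      rw [findMu, if_pos hc, fB_pr, fB_pr, show K + m + 1 = K + (m + 1) by omega,
        show ((m : Nat) : Int) + 1 = (((m + 1 : Nat)) : Int) by push_cast; ring]
      exact h4
    · push_neg at hc
      exact ⟨m, le_refl m, by obtain ⟨j, hj1, hj2, _⟩ := hj; omega, hc, by
        rw [findMu, if_neg (by simpa using hc)]⟩

lemma findLam_spec (N MOD : Int) (m B3 : Nat) :
    ∀ (fuel : Nat) (l : Nat),
    (∃ j, l ≤ j ∧ j ≤ B3 ∧ pr N MOD (m + j) = pr N MOD m) → B3 + 1 ≤ fuel + l →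
    ∃ lam, l ≤ lam ∧ lam ≤ B3 ∧ pr N MOD (m + lam) = pr N MOD m ∧
      findLam N MOD fuel (pr N MOD m) (pr N MOD (m + l)) (l : Int) = (lam : Int) := by
  intro fuel
  induction fuel with
  | zero =>
      intro l hj hf
      obtain ⟨j, hj1, hj2, _⟩ := hj
      omega
  | succ fuel ih =>
    intro l hj hf
    by_cases hc : pr N MOD m ≠ pr N MOD (m + l)
    · obtain ⟨j, hj1, hj2, hj3⟩ := hj
      have hlj : l + 1 ≤ j := by
        rcases Nat.lt_or_ge l j with h | h
        · omega
        · exfalso; have : l = j := by omega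
          subst this; exact hc hj3.symm
      obtain ⟨lam, h1, h2, h3, h4⟩ := ih (l + 1) ⟨j, hlj, hj2, hj3⟩ (by omega)
      refine ⟨lam, by omega, h2, h3, ?_⟩
      rw [findLam, if_pos hc, fB_pr, show m + l + 1 = m + (l + 1) by omega,
        show ((l : Nat) : Int) + 1 = (((l + 1 : Nat)) : Int) by push_cast; ring]
      exact h4
    · push_neg at hc
      exact ⟨l, le_refl l, by obtain ⟨j, hj1, hj2, _⟩ := hj; omega, hc.symm, by
        rw [findLam, if_neg (by simpa using hc)]⟩

lemma eniB_tail (N MOD EXP : Int) (aN lam : Nat) (h1 : 1 ≤ aN) (h2 : 1 ≤ lam)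
    (hbig : ¬ EXP ≤ ((aN : Int) - 1) + (lam : Int))
    (hanch : pr N MOD (aN + lam) = pr N MOD aN) :
    (walkB N MOD ((aN : Int) - 1).toNat 1 0).2
      + PySem.Int.floordiv (EXP - ((aN : Int) - 1)) (lam : Int)
          * (walkB N MOD ((lam : Int)).toNat (walkB N MOD ((aN : Int) - 1).toNat 1 0).1 0).2
      + (walkB N MOD (PySem.Int.mod (EXP - ((aN : Int) - 1)) (lam : Int)).toNat
          (walkB N MOD ((aN : Int) - 1).toNat 1 0).1 0).2
    = S N MOD 1 EXP.toNat := by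
  have hlamI : (0 : Int) < (lam : Int) := by exact_mod_cast h2
  have hpreN : ((aN : Int) - 1).toNat = aN - 1 := by omega
  rw [hpreN]
  have hw : walkB N MOD (aN - 1) (1 : Int) 0
      = (pr N MOD (0 + (aN - 1)), 0 + S N MOD (0 + 1) (aN - 1)) := walkB_spec N MOD (aN - 1) 0 0
  simp only [Nat.zero_add, zero_add] at hw
  simp only [hw]
  have hlamN : ((lam : Int)).toNat = lam := by omega
  rw [hlamN]
  have hc : walkB N MOD lam (pr N MOD (aN - 1)) 0
      = (pr N MOD ((aN - 1) + lam), 0 + S N MOD ((aN - 1) + 1) lam) :=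
    walkB_spec N MOD lam (aN - 1) 0
  rw [show (aN - 1) + 1 = aN from by omega] at hc
  simp only [hc, zero_add]
  set rI := PySem.Int.mod (EXP - ((aN : Int) - 1)) (lam : Int) with hrI
  set q := PySem.Int.floordiv (EXP - ((aN : Int) - 1)) (lam : Int) with hqI
  have hr0 : 0 ≤ rI := PySem.Int.mod_nonneg _ hlamI
  have hrlt : rI < (lam : Int) := PySem.Int.mod_lt _ hlamI
  have hdm : q * (lam : Int) + rI = EXP - ((aN : Int) - 1) := by
    rw [hqI, hrI]; exact PySem.Int.floordiv_mul_add_mod _ _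
  have hq0 : 0 ≤ q := by
    rw [hqI, PySem.Int.floordiv_eq_ediv_of_pos hlamI]
    exact Int.ediv_nonneg (by omega) (by omega)
  have hp : walkB N MOD rI.toNat (pr N MOD (aN - 1)) 0
      = (pr N MOD ((aN - 1) + rI.toNat), 0 + S N MOD ((aN - 1) + 1) rI.toNat) :=
    walkB_spec N MOD rI.toNat (aN - 1) 0
  rw [show (aN - 1) + 1 = aN from by omega] at hp
  simp only [hp, zero_add]
  have hqc : ((q.toNat : Nat) : Int) = q := Int.toNat_of_nonneg hq0
  have hrc : ((rI.toNat : Nat) : Int) = rI := Int.toNat_of_nonneg hr0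
  have hmul : (((q.toNat * lam : Nat)) : Int) = q * (lam : Int) := by push_cast; rw [hqc]
  have hsplit : EXP.toNat = (aN - 1) + (q.toNat * lam + rI.toNat) := by omega
  rw [hsplit, S_add N MOD 1 (aN - 1) (q.toNat * lam + rI.toNat),
    show 1 + (aN - 1) = aN from by omega, S_add N MOD aN (q.toNat * lam) rI.toNat,
    S_cycles N MOD aN lam hanch aN (le_refl aN) q.toNat,
    S_shift_iter N MOD aN lam hanch aN (le_refl aN) q.toNat rI.toNat, hqc]
  ring

lemma eniB_eq (N MOD EXP : Int) (h : 0 < EXP) :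
    eni_sum_remainders_alt N EXP MOD = S N MOD 1 EXP.toNat := by
  have hdirect : (walkB N MOD EXP.toNat (1 : Int) 0).2 = S N MOD 1 EXP.toNat := by
    have h' : walkB N MOD EXP.toNat (1 : Int) 0
        = (pr N MOD (0 + EXP.toNat), 0 + S N MOD (0 + 1) EXP.toNat) :=
      walkB_spec N MOD EXP.toNat 0 0
    rw [h']; simp
  unfold eni_sum_remainders_alt
  rw [if_neg (by omega)]
  obtain ⟨kf, hkf1, hkf2, hkf3, hkf4⟩ :=
    floyd_spec N MOD EXP h (EXP.toNat + 1) 1 (by omega) (by omega) (by omega)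
  have hFM : floydMeet N MOD EXP (EXP.toNat + 1) (fB N MOD 1) (fB N MOD (fB N MOD 1)) 1
      = (pr N MOD kf, pr N MOD (2 * kf), (kf : Int)) := hkf3
  simp only [hFM]
  by_cases hmeet : pr N MOD kf = pr N MOD (2 * kf)
  · rw [if_neg (by simpa using hmeet)]
    have hanch : pr N MOD (kf + kf) = pr N MOD kf := by
      rw [show kf + kf = 2 * kf from by ring]; exact hmeet.symm
    have hex2 : pr N MOD kf = pr N MOD (2 * kf + kf) := by
      rw [pr_shift N MOD kf kf hanch (2 * kf) (by omega)]; exact hmeet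
    obtain ⟨m', hm1, hm2, hm3, hm4⟩ := findMu_spec N MOD (2 * kf) kf (EXP.toNat + 2) 0
      ⟨kf, Nat.zero_le kf, le_refl kf, hex2⟩ (by omega)
    have hFMu : findMu N MOD (EXP.toNat + 2) 1 (pr N MOD (2 * kf)) 0
        = (pr N MOD m', pr N MOD (2 * kf + m'), (m' : Int)) := hm4
    simp only [hFMu]
    have hanchm : pr N MOD (m' + kf) = pr N MOD m' := by
      rw [show 2 * kf + m' = (kf + m') + kf from by omega] at hm3
      rw [pr_shift N MOD kf kf hanch (kf + m') (by omega)] at hm3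
      rw [show m' + kf = kf + m' from by omega]
      exact hm3.symm
    obtain ⟨lam, hl1, hl2, hl3, hl4⟩ := findLam_spec N MOD m' kf (EXP.toNat + 2) 1
      ⟨kf, hkf1, le_refl kf, hanchm⟩ (by omega)
    have hFL : findLam N MOD (EXP.toNat + 2) (pr N MOD m') (fB N MOD (pr N MOD m')) 1
        = ((lam : Nat) : Int) := hl4
    simp only [hFL]
    have hifa : (if (m' : Int) ≥ 1 then (m' : Int) else 1) = ((max m' 1 : Nat) : Int) := by
      split_ifs with hm <;> push_cast <;> omega
    simp only [hifa]
    have hanchA : pr N MOD (max m' 1 + lam) = pr N MOD (max m' 1) :=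
      pr_shift N MOD m' lam hl3 (max m' 1) (le_max_left m' 1)
    by_cases hble : EXP ≤ (((max m' 1 : Nat) : Int) - 1) + (lam : Int)
    · rw [if_pos hble]; exact hdirect
    · rw [if_neg hble]
      exact eniB_tail N MOD EXP (max m' 1) lam (le_max_right m' 1) hl1 hble hanchA
  · rw [if_pos (by simpa using hmeet)]
    exact hdirect

-- ===== VERDICT (by name: the statement is the Claim_ definition above) =====
theorem eni_sum_remainders_spec : Claim_equal_eni_sum_remainders := by
  intro N EXP MOD _ hPre
  unfold Spec_eni_sum_remainders
  rcases lt_or_ge 0 EXP with hE | hE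
  · rw [eniA_eq N MOD EXP hE, eniB_eq N MOD EXP hE]
  · -- EXP ≤ 0: both return 0
    unfold eni_sum_remainders eni_sum_remainders_alt
    rcases eq_or_lt_of_le hE with h0 | hneg
    · simp [← h0]
    · rw [if_neg (by omega), if_pos (by omega), eniLoopA]
      simp [show ¬ ((0:Int) < EXP) by omega]
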